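-- pv_equiv track=rewrite | github.com/prashanth-thipparthi/nlp_assgn2 | Viterbi.py | BigramTransitionMatrix
-- ===== SOURCE A (Python) =====
-- tagSeparator = "|"
--
-- def BigramTransitionMatrix(unique_tags, tag_sequence):
--     transitionMatrix = {}
--     ### initialising transition matrix ###
--     for i in unique_tags:
--         for j in unique_tags:
--             transitionMatrix[i + tagSeparator + j] = 0
--
--     ### Adding counts to the transition matrix ###
--     for i in range(1, len(tag_sequence)):
--         k1 = tag_sequence[i - 1]
--         k2 = tag_sequence[i]
--         fk = k2 + tagSeparator + k1  # currenttag-Prevtag ##P (Tag  given previous tag)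
--         if fk in transitionMatrix.keys():
--             transitionMatrix[fk] += 1
--     return transitionMatrix
-- ===== SOURCE B (Python) =====
-- tagSeparator = "|"
--
-- def BigramTransitionMatrix(unique_tags, tag_sequence):
--     # Build the list of adjacent bigram keys once, then fill each matrix
--     # cell by directly counting that key's occurrences in the bigram list:
--     # no dict is updated incrementally and no membership guard exists.
--     bigrams = [cur + tagSeparator + prev
--                for prev, cur in zip(tag_sequence, tag_sequence[1:])]
--     return {i + tagSeparator + j: bigrams.count(i + tagSeparator + j)
--             for i in unique_tags for j in unique_tags}
-- ===== Notes on version B (the rewrite author's own statement) =====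
-- stated objective: simpler
-- what changed: B builds the list of adjacent bigram keys once and fills each matrix cell by directly counting that key in the list (per-cell scan, no incremental dict updates and no membership guard), where A pre-zeroes the matrix and walks the sequence by index incrementing guarded entries.
import Mathlib
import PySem

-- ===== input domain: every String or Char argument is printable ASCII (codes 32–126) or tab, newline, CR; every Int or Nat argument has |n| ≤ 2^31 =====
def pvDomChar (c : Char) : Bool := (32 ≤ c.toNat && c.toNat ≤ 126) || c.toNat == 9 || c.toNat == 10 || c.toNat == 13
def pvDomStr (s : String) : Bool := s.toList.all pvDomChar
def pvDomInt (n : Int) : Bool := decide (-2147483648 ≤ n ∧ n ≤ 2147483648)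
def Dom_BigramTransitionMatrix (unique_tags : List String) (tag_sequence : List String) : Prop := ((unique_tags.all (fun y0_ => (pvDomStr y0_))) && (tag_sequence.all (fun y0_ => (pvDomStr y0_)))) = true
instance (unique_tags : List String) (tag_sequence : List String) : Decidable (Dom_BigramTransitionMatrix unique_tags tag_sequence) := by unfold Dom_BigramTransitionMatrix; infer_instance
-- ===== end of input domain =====

-- B builds the adjacent-bigram key list once and fills each matrix cell by directly
-- counting that key in the list (no incremental dict, no membership guard); objective: simpler.

-- ===== PORT A =====
def BigramTransitionMatrix (unique_tags : List String) (tag_sequence : List String) : List (String × Int) :=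
  let init : PySem.Dict String Int :=
    unique_tags.foldl (fun d i =>
      unique_tags.foldl (fun d j => d.insert (i ++ "|" ++ j) 0) d) PySem.Dict.empty
  let final :=
    (PySem.List.pyRange 1 (PySem.List.len tag_sequence) 1).foldl (fun d i =>
      let k1 := PySem.List.pyGetD tag_sequence (i - 1) ""   -- index provably in range
      let k2 := PySem.List.pyGetD tag_sequence i ""          -- index provably in range
      let fk := k2 ++ "|" ++ k1
      if d.contains fk then d.modify fk 0 (· + 1) else d) init
  final.items

-- ===== PORT B =====
def BigramTransitionMatrix_alt (unique_tags : List String) (tag_sequence : List String) : List (String × Int) :=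
  let bigrams := (tag_sequence.zip (tag_sequence.drop 1)).map (fun p => p.2 ++ "|" ++ p.1)
  (unique_tags.foldl (fun d i =>
    unique_tags.foldl (fun d j =>
      d.insert (i ++ "|" ++ j) ((PySem.List.count bigrams (i ++ "|" ++ j) : Int))) d)
    PySem.Dict.empty).items

-- ===== PRECONDITION & SPEC =====
def Spec_BigramTransitionMatrix (unique_tags : List String) (tag_sequence : List String) (out : List (String × Int)) : Prop := out = BigramTransitionMatrix_alt unique_tags tag_sequence
instance (unique_tags : List String) (tag_sequence : List String) (out : List (String × Int)) : Decidable (Spec_BigramTransitionMatrix unique_tags tag_sequence out) := by unfold Spec_BigramTransitionMatrix; infer_instance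

-- ===== CLAIM (what is proved, stated in full; the proofs are below) =====
def Claim_equal_BigramTransitionMatrix : Prop := ∀ (unique_tags : List String) (tag_sequence : List String), Dom_BigramTransitionMatrix unique_tags tag_sequence → Spec_BigramTransitionMatrix unique_tags tag_sequence (BigramTransitionMatrix unique_tags tag_sequence)

-- ===== LEMMAS AND PROOFS =====

-- the list of bigram keys "cur|prev" of a sequence
def pvBigrams (ts : List String) : List String :=
  (ts.zip (ts.drop 1)).map (fun p => p.2 ++ "|" ++ p.1)

-- A's index loop enumerates exactly the bigram keys
theorem pvBigramKeys (ts : List String) :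
    (PySem.List.pyRange 1 (PySem.List.len ts) 1).map
      (fun i => PySem.List.pyGetD ts i "" ++ "|" ++ PySem.List.pyGetD ts (i - 1) "")
    = pvBigrams ts := by
  apply List.ext_getElem
  · simp [pvBigrams, PySem.List.length_pyRange_one, PySem.List.len]
  · intro k h1 h2
    have hk : k < ts.length - 1 := by
      simp [PySem.List.length_pyRange_one, PySem.List.len] at h1
      omega
    simp only [List.getElem_map, PySem.List.getElem_pyRange_one, pvBigrams, List.getElem_zip,
      List.getElem_drop]
    have e1 : PySem.List.pyGetD ts (1 + (k : Int)) "" = ts[1 + k]'(by omega) := by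
      rw [PySem.List.pyGetD_eq_getElem ts "" (by omega) (by omega)]
      congr 1
    have e2 : PySem.List.pyGetD ts (1 + (k : Int) - 1) "" = ts[k]'(by omega) := by
      rw [PySem.List.pyGetD_eq_getElem ts "" (by omega) (by omega)]
      congr 1
      omega
    rw [e1, e2]

theorem pvMapIdOf {α : Type} (g : α → α) (l : List α) (h : ∀ a ∈ l, g a = a) :
    l.map g = l := by
  induction l with
  | nil => rfl
  | cons a l ih =>
    simp only [List.map_cons, h a (by simp)]
    rw [ih (fun b hb => h b (by simp [hb]))]

-- first-match lookup in a key-Nodup association list returns the entry's own value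
theorem pvGetDOfMem (l : List (String × Int)) (p : String × Int) (hp : p ∈ l)
    (hnd : (l.map Prod.fst).Nodup) : (PySem.Dict.mk l).getD p.1 0 = p.2 := by
  induction l with
  | nil => cases hp
  | cons a l ih =>
    obtain ⟨a1, a2⟩ := a
    rcases List.mem_cons.mp hp with hp | hp
    · subst hp
      simp [PySem.Dict.getD, PySem.Dict.get?_mk_cons]
    · have hne : (a1 == p.1) = false := by
        have hmem : p.1 ∈ l.map Prod.fst := List.mem_map_of_mem hp
        simp only [List.map_cons, List.nodup_cons] at hnd
        simp only [beq_eq_false_iff_ne, ne_eq]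
        intro hEq
        exact hnd.1 (hEq ▸ hmem)
      have hrec := ih hp (by simp only [List.map_cons, List.nodup_cons] at hnd; exact hnd.2)
      simpa [PySem.Dict.getD, PySem.Dict.get?_mk_cons, hne] using hrec

-- one guarded-increment step, at the items level
theorem pvStepItems (k : String) (l : List (String × Int))
    (hnd : (l.map Prod.fst).Nodup) :
    (if (PySem.Dict.mk l).contains k then (PySem.Dict.mk l).modify k 0 (· + 1)
     else PySem.Dict.mk l).items
    = l.map (fun p => if p.1 == k then (p.1, p.2 + 1) else p) := by
  by_cases hc : (PySem.Dict.mk l).contains k = true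
  · rw [if_pos hc]
    simp only [PySem.Dict.modify, PySem.Dict.insert, hc, if_true]
    apply List.map_congr_left
    intro p hp
    by_cases hpk : (p.1 == k) = true
    · have hp1 : p.1 = k := by simpa using hpk
      have hval : (PySem.Dict.mk l).getD k 0 = p.2 := by
        rw [← hp1]; exact pvGetDOfMem l p hp hnd
      simp [hval, hp1]
    · simp [hpk]
  · rw [if_neg hc]
    have hall : ∀ p ∈ l, (p.1 == k) = false := by
      intro p hp
      by_contra hne
      apply hc
      simp only [PySem.Dict.contains, List.any_eq_true]
      exact ⟨p, hp, by simpa using hne⟩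
    rw [pvMapIdOf (fun p => if p.1 == k then (p.1, p.2 + 1) else p) l
      (by intro p hp; simp [hall p hp])]

-- the whole guarded-increment loop adds each key's occurrence count
theorem pvIncFoldItems (bs : List String) : ∀ (l : List (String × Int)),
    (l.map Prod.fst).Nodup →
    (bs.foldl (fun d k => if d.contains k then d.modify k 0 (· + 1) else d)
      (PySem.Dict.mk l)).items
    = l.map (fun p => (p.1, p.2 + (bs.count p.1 : Int))) := by
  induction bs with
  | nil =>
    intro l _
    simp only [List.foldl_nil, List.count_nil, Int.natCast_zero, add_zero]
    exact (pvMapIdOf _ l (by intro p _; rfl)).symm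
  | cons k bs ih =>
    intro l hnd
    rw [List.foldl_cons]
    have hstep : ((if (PySem.Dict.mk l).contains k then (PySem.Dict.mk l).modify k 0 (· + 1)
        else PySem.Dict.mk l))
        = PySem.Dict.mk (l.map (fun p => if p.1 == k then (p.1, p.2 + 1) else p)) := by
      apply PySem.Dict.ext
      exact pvStepItems k l hnd
    rw [hstep]
    have hkeys : ((l.map (fun p => if p.1 == k then (p.1, p.2 + 1) else p)).map Prod.fst)
        = l.map Prod.fst := by
      rw [List.map_map]
      apply List.map_congr_left
      intro p _
      simp only [Function.comp_apply]
      split <;> rfl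
    rw [ih _ (by rw [hkeys]; exact hnd), List.map_map]
    apply List.map_congr_left
    intro p _
    by_cases hpk : (p.1 == k) = true
    · have hp1 : p.1 = k := by simpa using hpk
      simp [hp1, List.count_cons_self]
      try omega
    · have hne : p.1 ≠ k := by simpa using hpk
      simp [hne, Ne.symm hne]

-- building with value g(key) instead of 0 only rewrites the stored values
theorem pvInsFoldItems (g : String → Int) (ks : List String) : ∀ (l : List (String × Int)),
    (ks.foldl (fun d k => d.insert k (g k))
      (PySem.Dict.mk (l.map (fun p => (p.1, g p.1))))).items
    = ((ks.foldl (fun d k => d.insert k (0 : Int)) (PySem.Dict.mk l)).items).map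
        (fun p => (p.1, g p.1)) := by
  induction ks with
  | nil => intro l; simp
  | cons k ks ih =>
    intro l
    rw [List.foldl_cons, List.foldl_cons]
    have hcont : (PySem.Dict.mk (l.map (fun p => (p.1, g p.1)))).contains k
        = (PySem.Dict.mk l).contains k := by
      simp [PySem.Dict.contains, List.any_map, Function.comp_def]
    have hins : (PySem.Dict.mk (l.map (fun p => (p.1, g p.1)))).insert k (g k)
        = PySem.Dict.mk ((((PySem.Dict.mk l).insert k (0 : Int)).items).map
            (fun p => (p.1, g p.1))) := by
      apply PySem.Dict.ext
      by_cases hc : (PySem.Dict.mk l).contains k = true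
      · simp only [PySem.Dict.insert, hcont, hc, if_true, List.map_map]
        apply List.map_congr_left
        intro p _
        by_cases hpk : (p.1 == k) = true <;> simp [Function.comp, hpk]
      · simp only [PySem.Dict.insert, hcont, hc, if_false, Bool.false_eq_true, List.map_append]
        rfl
    rw [hins]
    have := ih (((PySem.Dict.mk l).insert k (0 : Int)).items)
    simpa using this

-- every value written by the zero-initialising loop is 0
theorem pvInsZeroVals (ks : List String) : ∀ (l : List (String × Int)),
    (∀ p ∈ l, p.2 = 0) →
    ∀ p ∈ (ks.foldl (fun d k => d.insert k (0 : Int)) (PySem.Dict.mk l)).items, p.2 = 0 := by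
  induction ks with
  | nil => intro l h; simpa using h
  | cons k ks ih =>
    intro l h
    rw [List.foldl_cons]
    have : (PySem.Dict.mk l).insert k (0 : Int)
        = PySem.Dict.mk (((PySem.Dict.mk l).insert k (0 : Int)).items) := by
      apply PySem.Dict.ext; rfl
    rw [this]
    apply ih
    intro p hp
    simp only [PySem.Dict.insert] at hp
    by_cases hc : (PySem.Dict.mk l).contains k = true
    · simp only [hc, if_true] at hp
      rcases List.mem_map.mp hp with ⟨q, hq, hqe⟩
      by_cases hqk : (q.1 == k) = true
      · simp only [hqk, if_true] at hqe
        simp [← hqe]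
      · simp only [hqk] at hqe
        rw [← hqe]; exact h q hq
    · simp only [hc] at hp
      rcases List.mem_append.mp hp with hp | hp
      · exact h p hp
      · simp at hp; rw [hp]

-- the zero-initialising loop keeps its key list Nodup
theorem pvInsZeroNodup (ks : List String) : ∀ (l : List (String × Int)),
    (l.map Prod.fst).Nodup →
    ((ks.foldl (fun d k => d.insert k (0 : Int)) (PySem.Dict.mk l)).items.map Prod.fst).Nodup := by
  induction ks with
  | nil => intro l h; simpa using h
  | cons k ks ih =>
    intro l h
    rw [List.foldl_cons]
    have heta : (PySem.Dict.mk l).insert k (0 : Int)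
        = PySem.Dict.mk (((PySem.Dict.mk l).insert k (0 : Int)).items) := by
      apply PySem.Dict.ext; rfl
    rw [heta]
    apply ih
    simp only [PySem.Dict.insert]
    by_cases hc : (PySem.Dict.mk l).contains k = true
    · simp only [hc, if_true, List.map_map]
      have : (l.map (Prod.fst ∘ fun p => if p.1 == k then (k, (0 : Int)) else p)) = l.map Prod.fst := by
        apply List.map_congr_left
        intro p _
        by_cases hpk : (p.1 == k) = true
        · have : p.1 = k := by simpa using hpk
          simp [Function.comp, this]
        · simp [Function.comp, hpk]
      rw [this]; exact h
    · simp only [hc, if_false, Bool.false_eq_true, List.map_append, List.map_cons, List.map_nil]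
      have hk : k ∉ l.map Prod.fst := by
        intro hmem
        rcases List.mem_map.mp hmem with ⟨q, hq, hqe⟩
        apply hc
        simp only [PySem.Dict.contains, List.any_eq_true]
        exact ⟨q, hq, by simp [hqe]⟩
      simp [List.nodup_append, h]
      intro a x hax hak
      exact hk (hak ▸ List.mem_map_of_mem hax)

-- ===== VERDICT (by name: the statement is the Claim_ definition above) =====
theorem BigramTransitionMatrix_spec : Claim_equal_BigramTransitionMatrix := by
  intro ut ts _
  show BigramTransitionMatrix ut ts = BigramTransitionMatrix_alt ut ts
  unfold BigramTransitionMatrix BigramTransitionMatrix_alt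
  simp only []
  -- B's bigram list is pvBigrams, and each stored value is its count there
  have hBcnt : ∀ k, ((PySem.List.count ((ts.zip (ts.drop 1)).map (fun p => p.2 ++ "|" ++ p.1)) k : Int))
      = ((pvBigrams ts).count k : Int) := by
    intro k
    rw [PySem.List.count_eq]
    rfl
  simp only [hBcnt]
  -- flatten the two nested build loops over the flat key list
  have hflat0 : ut.foldl (fun d i =>
        ut.foldl (fun d j => d.insert (i ++ "|" ++ j) (0 : Int)) d) PySem.Dict.empty
      = (ut.flatMap (fun i => ut.map (fun j => i ++ "|" ++ j))).foldl
          (fun d k => d.insert k (0 : Int)) PySem.Dict.empty := by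
    rw [List.foldl_flatMap]
    simp only [List.foldl_map]
  have hflatg : ut.foldl (fun d i =>
        ut.foldl (fun d j => d.insert (i ++ "|" ++ j) (((pvBigrams ts).count (i ++ "|" ++ j) : Int))) d)
        PySem.Dict.empty
      = (ut.flatMap (fun i => ut.map (fun j => i ++ "|" ++ j))).foldl
          (fun d k => d.insert k (((pvBigrams ts).count k : Int))) PySem.Dict.empty := by
    rw [List.foldl_flatMap]
    simp only [List.foldl_map]
  rw [hflat0, hflatg]
  -- A's index loop is the guarded-increment loop over the bigram key list
  have hA : (PySem.List.pyRange 1 (PySem.List.len ts)).foldl (fun d i =>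
        if d.contains (PySem.List.pyGetD ts i "" ++ "|" ++ PySem.List.pyGetD ts (i - 1) "") then
          d.modify (PySem.List.pyGetD ts i "" ++ "|" ++ PySem.List.pyGetD ts (i - 1) "") 0 (· + 1)
        else d)
        ((ut.flatMap (fun i => ut.map (fun j => i ++ "|" ++ j))).foldl
          (fun d k => d.insert k (0 : Int)) PySem.Dict.empty)
      = (pvBigrams ts).foldl (fun d k => if d.contains k then d.modify k 0 (· + 1) else d)
        ((ut.flatMap (fun i => ut.map (fun j => i ++ "|" ++ j))).foldl
          (fun d k => d.insert k (0 : Int)) PySem.Dict.empty) := by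
    rw [← pvBigramKeys ts, List.foldl_map]
  rw [hA]
  set ks := ut.flatMap (fun i => ut.map (fun j => i ++ "|" ++ j)) with hks
  set I := ks.foldl (fun d k => d.insert k (0 : Int)) PySem.Dict.empty with hI
  have hnd : (I.items.map Prod.fst).Nodup := pvInsZeroNodup ks [] (by simp)
  have hvals : ∀ p ∈ I.items, p.2 = 0 := pvInsZeroVals ks [] (by simp)
  have eA : ((pvBigrams ts).foldl
        (fun d k => if d.contains k then d.modify k 0 (· + 1) else d) I).items
      = I.items.map (fun p => (p.1, p.2 + ((pvBigrams ts).count p.1 : Int))) :=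
    pvIncFoldItems (pvBigrams ts) I.items hnd
  have eB : (ks.foldl (fun d k => d.insert k (((pvBigrams ts).count k : Int))) PySem.Dict.empty).items
      = I.items.map (fun p => (p.1, ((pvBigrams ts).count p.1 : Int))) :=
    pvInsFoldItems (fun k => ((pvBigrams ts).count k : Int)) ks []
  rw [eA, eB]
  apply List.map_congr_left
  intro p hp
  rw [hvals p hp, zero_add]
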